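-- pv_equiv track=rewrite | github.com/zeoneee/Algorithm-study | Programmers/121683.py | solution
-- ===== SOURCE A (Python) =====
-- def solution(input_string):
--     answer = ''
--     temp_list = []
--     i = 0
--     for a in input_string:
--         if a in temp_list:
--             temp = temp_list.pop()  # 직전 index value pop
--             if temp != a:
--                 if not(a in answer):
--                     answer += a
--             temp_list.append(temp)
--             temp_list.append(a)
--             i += 1
--         else:
--             temp_list.append(a)
--             i += 1
--
--     answer = ''.join(sorted(list(answer)))
--
--     if answer == "":
--         answer = "N"
--
--     return answer
-- ===== SOURCE B (Python) =====
-- def solution(input_string):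
--     collapsed = []
--     for ch in input_string:
--         if not collapsed or collapsed[-1] != ch:
--             collapsed.append(ch)
--     repeated = {ch for ch in collapsed if collapsed.count(ch) >= 2}
--     return ''.join(sorted(repeated)) or 'N'
-- ===== Notes on version B (the rewrite author's own statement) =====
-- stated objective: simpler
-- what changed: B replaces A's per-character membership scans over the ever-growing temp_list and answer string by one run-length collapsing pass plus counting over the (usually much shorter) collapsed list of runs.
import Mathlib
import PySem

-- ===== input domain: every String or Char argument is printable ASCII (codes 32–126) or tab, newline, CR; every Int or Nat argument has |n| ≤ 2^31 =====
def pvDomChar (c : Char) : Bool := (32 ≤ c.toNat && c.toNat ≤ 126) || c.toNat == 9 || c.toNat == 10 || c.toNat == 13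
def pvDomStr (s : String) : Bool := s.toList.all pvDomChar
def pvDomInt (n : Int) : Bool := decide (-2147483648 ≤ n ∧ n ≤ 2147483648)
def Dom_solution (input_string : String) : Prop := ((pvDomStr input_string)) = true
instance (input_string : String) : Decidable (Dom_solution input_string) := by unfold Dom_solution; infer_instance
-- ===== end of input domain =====

-- B replaces A's pop/re-append bookkeeping by run-length collapsing the string and
-- collecting the characters that head at least two runs (objective: simpler).

-- ===== PORT A =====
-- loop body of A's for-loop; state = (answer, temp_list, i)
def solStep (st : List Char × List Char × Int) (a : Char) : List Char × List Char × Int :=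
  if a ∈ st.2.1 then
    match PySem.List.pop? st.2.1 with        -- temp = temp_list.pop()
    | none => st                             -- unreachable: membership makes temp_list nonempty
    | some (temp, rest) =>
      let answer := if temp ≠ a then (if ¬ (a ∈ st.1) then st.1 ++ [a] else st.1) else st.1
      (answer, (rest ++ [temp]) ++ [a], st.2.2 + 1)
  else (st.1, st.2.1 ++ [a], st.2.2 + 1)

def solution (input_string : String) : String :=
  let st := input_string.toList.foldl solStep ([], [], 0)
  let answer := PySem.Str.join "" ((PySem.List.sorted st.1 (fun c => c) false).map (fun c => String.ofList [c]))
  if answer = "" then "N" else answer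

-- ===== PORT B =====
-- loop body of B's collapsing loop
def altCollapse (acc : List Char) (ch : Char) : List Char :=
  if acc = [] ∨ PySem.List.pyGet? acc (-1) ≠ some ch then acc ++ [ch] else acc

def solution_alt (input_string : String) : String :=
  let collapsed := input_string.toList.foldl altCollapse []
  let repeated := PySem.Set.ofList (collapsed.filter (fun ch => 2 ≤ PySem.List.count collapsed ch))
  let res := PySem.Str.join "" ((PySem.List.sorted repeated (fun c => c) false).map (fun c => String.ofList [c]))
  if res = "" then "N" else res

-- ===== PRECONDITION & SPEC =====
def Spec_solution (input_string : String) (out : String) : Prop := out = solution_alt input_string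
instance (input_string : String) (out : String) : Decidable (Spec_solution input_string out) := by unfold Spec_solution; infer_instance

-- ===== CLAIM (what is proved, stated in full; the proofs are below) =====
def Claim_equal_solution : Prop := ∀ (input_string : String), Dom_solution input_string → Spec_solution input_string (solution input_string)

-- ===== LEMMAS AND PROOFS =====

theorem pyGet_neg_one_eq_getLast? {α : Type} (xs : List α) :
    PySem.List.pyGet? xs (-1) = xs.getLast? := by
  simp only [PySem.List.pyGet?, PySem.List.pyIdx?]
  rcases xs with _ | ⟨x, t⟩
  · simp
  · simp only [List.length_cons]
    norm_num
    rw [List.getLast?_eq_getElem?]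
    simp

theorem collapse_getLast? (l : List Char) :
    (l.foldl altCollapse []).getLast? = l.getLast? := by
  induction l using List.reverseRecOn with
  | nil => rfl
  | append_singleton l a _ =>
    rw [List.foldl_append]
    simp only [List.foldl_cons, List.foldl_nil, altCollapse, pyGet_neg_one_eq_getLast?]
    split
    · simp
    · rename_i h
      rw [not_or, not_not] at h
      simp [h.2]

theorem collapse_append (l : List Char) (a : Char) :
    (l ++ [a]).foldl altCollapse [] =
      if l.getLast? = some a then l.foldl altCollapse []
      else l.foldl altCollapse [] ++ [a] := by
  rw [List.foldl_append]
  simp only [List.foldl_cons, List.foldl_nil, altCollapse, pyGet_neg_one_eq_getLast?,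
    collapse_getLast?]
  rcases eq_or_ne (l.getLast?) (some a) with h | h
  · have hne : l.foldl altCollapse [] ≠ [] := by
      intro he
      have := collapse_getLast? l
      rw [he] at this
      rw [← this] at h
      simp at h
    simp [h, hne]
  · simp [h]

theorem mem_collapse (l : List Char) (a : Char) :
    a ∈ l.foldl altCollapse [] ↔ a ∈ l := by
  induction l using List.reverseRecOn with
  | nil => simp
  | append_singleton l x ih =>
    rw [collapse_append]
    split
    · rename_i h
      have hx : x ∈ l := List.mem_of_getLast? h
      rw [ih]
      simp only [List.mem_append, List.mem_singleton]
      exact ⟨Or.inl, fun h2 => h2.elim id (fun he => he ▸ hx)⟩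
    · simp [ih]

theorem solStep_invariant (l : List Char) :
    (l.foldl solStep ([], [], 0)).2.1 = l ∧
    (l.foldl solStep ([], [], 0)).1.Nodup ∧
    ∀ c, c ∈ (l.foldl solStep ([], [], 0)).1 ↔ 2 ≤ (l.foldl altCollapse []).count c := by
  induction l using List.reverseRecOn with
  | nil => exact ⟨rfl, List.nodup_nil, by intro c; simp [List.foldl]⟩
  | append_singleton l a ih =>
    obtain ⟨htl, hnd, hmem⟩ := ih
    rw [List.foldl_append, List.foldl_append]
    simp only [List.foldl_cons, List.foldl_nil]
    have hC : altCollapse (List.foldl altCollapse [] l) a =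
        if l.getLast? = some a then l.foldl altCollapse []
        else l.foldl altCollapse [] ++ [a] := by
      have h := collapse_append l a
      rw [List.foldl_append] at h
      simpa using h
    rw [hC]
    rcases hst : List.foldl solStep ([], [], 0) l with ⟨ans, tl, i⟩
    rw [hst] at htl hnd hmem
    dsimp only at htl hnd hmem
    subst tl
    by_cases hal : a ∈ l
    · have hlne : l ≠ [] := List.ne_nil_of_mem hal
      obtain ⟨l', x, rfl⟩ := List.eq_nil_or_concat l |>.resolve_left hlne
      simp only [List.concat_eq_append] at hC hmem hal ⊢
      have hstep : solStep (ans, l' ++ [x], i) a =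
          ((if x ≠ a then (if ¬ (a ∈ ans) then ans ++ [a] else ans) else ans),
            (l' ++ [x]) ++ [a], i + 1) := by
        unfold solStep
        dsimp only
        rw [if_pos hal, PySem.List.pop?_last]
      rw [hstep]
      have hlast : (l' ++ [x]).getLast? = some x := by simp
      have hmemC : a ∈ (l' ++ [x]).foldl altCollapse [] := (mem_collapse _ a).2 hal
      have hcnt1 : 1 ≤ ((l' ++ [x]).foldl altCollapse []).count a := List.count_pos_iff.2 hmemC
      have hone : ∀ c : Char, List.count c [a] = if c = a then 1 else 0 := by
        intro c
        rcases eq_or_ne c a with rfl | h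
        · simp
        · simp [Ne.symm h, h]
      by_cases hxa : x = a
      · subst hxa
        rw [if_pos hlast]
        refine ⟨rfl, ?_, fun c => ?_⟩
        · simpa using hnd
        · simpa using hmem c
      · rw [if_neg (show ¬((l' ++ [x]).getLast? = some a) from by
          rw [hlast]; simpa using hxa)]
        dsimp only
        rw [if_pos hxa]
        by_cases haans : a ∈ ans
        · rw [if_neg (by simpa using haans)]
          refine ⟨rfl, hnd, fun c => ?_⟩
          rw [List.count_append, hone c]
          rcases eq_or_ne c a with rfl | hca
          · have h2 := (hmem c).1 haans
            rw [if_pos rfl]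
            exact ⟨fun _ => by omega, fun _ => haans⟩
          · rw [if_neg hca, Nat.add_zero]
            exact hmem c
        · rw [if_pos (by simpa using haans)]
          refine ⟨rfl, ?_, fun c => ?_⟩
          · have h2 := List.Nodup.concat haans hnd
            simpa using h2
          · rw [List.count_append, hone c]
            rcases eq_or_ne c a with rfl | hca
            · rw [if_pos rfl]
              exact ⟨fun _ => by omega,
                fun _ => List.mem_append.2 (Or.inr (List.mem_singleton.2 rfl))⟩
            · rw [if_neg hca, Nat.add_zero]
              simp only [List.mem_append, List.mem_singleton, hca, or_false]
              exact hmem c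
    · have hstep : solStep (ans, l, i) a = (ans, l ++ [a], i + 1) := by
        unfold solStep
        dsimp only
        rw [if_neg hal]
      rw [hstep]
      have hlastne : l.getLast? ≠ some a := fun h => hal (List.mem_of_getLast? h)
      rw [if_neg hlastne]
      have hnmemC : a ∉ l.foldl altCollapse [] := fun h => hal ((mem_collapse _ a).1 h)
      have hcnt0 : (l.foldl altCollapse []).count a = 0 := List.count_eq_zero.2 hnmemC
      refine ⟨rfl, hnd, ?_⟩
      intro c
      have hone : List.count c [a] = if c = a then 1 else 0 := by
        rcases eq_or_ne c a with rfl | h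
        · simp
        · simp [Ne.symm h, h]
      rw [List.count_append, hone]
      rcases eq_or_ne c a with rfl | hca
      · rw [if_pos rfl]
        constructor
        · intro h; exact absurd ((hmem c).1 h) (by omega)
        · intro h; omega
      · rw [if_neg hca, Nat.add_zero]
        exact hmem c

theorem sorted_answer_eq (l : List Char) :
    PySem.List.sorted (l.foldl solStep ([], [], 0)).1 (fun c => c) false =
    PySem.List.sorted
      (PySem.Set.ofList ((l.foldl altCollapse []).filter
        (fun ch => 2 ≤ PySem.List.count (l.foldl altCollapse []) ch))) (fun c => c) false := by
  obtain ⟨-, hnd, hmem⟩ := solStep_invariant l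
  apply PySem.List.sorted_eq_sorted_of_perm _ _ _ (fun a b h => h)
  rw [List.perm_ext_iff_of_nodup hnd (PySem.Set.nodup_ofList _)]
  intro c
  rw [hmem c, PySem.Set.mem_ofList, List.mem_filter]
  constructor
  · intro h2
    refine ⟨List.count_pos_iff.1 (by omega), ?_⟩
    simpa [PySem.List.count_eq] using h2
  · rintro ⟨-, h2⟩
    simpa [PySem.List.count_eq] using h2


-- ===== VERDICT (by name: the statement is the Claim_ definition above) =====
theorem solution_spec : Claim_equal_solution := by
  intro s _
  show solution s = solution_alt s
  unfold solution solution_alt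
  dsimp only
  rw [sorted_answer_eq s.toList]
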